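-- pv_equiv track=rewrite | github.com/Dannyel-05/quant-fund | altdata/processing/article_reader.py | _is_paywalled
-- ===== SOURCE A (Python) =====
-- def _is_paywalled(text: str, url: str) -> bool:
--     """Heuristic paywall detection."""
--     low = text.lower()
--     paywall_phrases = [
--         "subscribe to read", "subscription required", "sign in to read",
--         "members only", "premium content", "paywall", "subscribe now",
--         "create a free account", "already a subscriber",
--     ]
--     return any(p in low for p in paywall_phrases) or len(text.split()) < 100
-- ===== SOURCE B (Python) =====
-- def _is_paywalled(text: str, url: str) -> bool:
--     """Heuristic paywall detection: one forward scan for phrases, one pass to count words."""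
--     low = text.lower()
--     phrases = (
--         "subscribe to read", "subscription required", "sign in to read",
--         "members only", "premium content", "paywall", "subscribe now",
--         "create a free account", "already a subscriber",
--     )
--     for j in range(len(low)):
--         if low.startswith(phrases, j):
--             return True
--     words = 0
--     in_word = False
--     for ch in text:
--         if ch.isspace():
--             in_word = False
--         elif not in_word:
--             words += 1
--             in_word = True
--     return words < 100
-- ===== Notes on version B (the rewrite author's own statement) =====
-- stated objective: alternative
-- what changed: Replaces the nine independent substring searches with a single forward scan that tests all phrases as prefixes at each position, and replaces building the split() list with a one-pass whitespace-transition word counter.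
import Mathlib
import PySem

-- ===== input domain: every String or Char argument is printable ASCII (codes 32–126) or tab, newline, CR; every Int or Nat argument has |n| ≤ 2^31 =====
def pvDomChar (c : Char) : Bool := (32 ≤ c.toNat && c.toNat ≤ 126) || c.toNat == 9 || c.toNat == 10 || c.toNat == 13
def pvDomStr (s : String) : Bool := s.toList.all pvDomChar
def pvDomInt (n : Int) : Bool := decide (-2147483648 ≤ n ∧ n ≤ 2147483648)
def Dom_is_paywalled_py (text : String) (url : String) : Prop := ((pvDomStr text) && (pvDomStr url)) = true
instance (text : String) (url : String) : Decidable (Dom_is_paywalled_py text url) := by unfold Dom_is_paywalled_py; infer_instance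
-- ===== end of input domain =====

-- B changes the algorithm: one forward scan testing all phrases as prefixes at each
-- position, and a one-pass whitespace-transition word counter instead of split().

-- ===== PORT A =====
def pvPhrasesA : List String :=
  ["subscribe to read", "subscription required", "sign in to read",
   "members only", "premium content", "paywall", "subscribe now",
   "create a free account", "already a subscriber"]

def is_paywalled_py (text : String) (url : String) : Bool :=
  let low := PySem.Str.lower text
  (pvPhrasesA.any fun p => PySem.Str.isIn p low)
    || decide (((PySem.Str.split₀ text).length : Int) < 100)

-- ===== PORT B =====
def pvPhrasesB : List String :=
  ["subscribe to read", "subscription required", "sign in to read",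
   "members only", "premium content", "paywall", "subscribe now",
   "create a free account", "already a subscriber"]

-- the `for j in range(len(low)): if low.startswith(phrases, j)` loop, as structural
-- recursion over the suffix of `low` starting at j
def pvScan (phrases : List String) : List Char → Bool
  | [] => false
  | c :: rest =>
    if phrases.any (fun p => p.toList.isPrefixOf (c :: rest)) then true
    else pvScan phrases rest

-- the one-pass word counter: `in_word` flag, count whitespace→non-whitespace transitions
def pvWordCount : List Char → Bool → Nat
  | [], _ => 0
  | c :: rest, inWord =>
    if PySem.Chars.isspace c then pvWordCount rest false
    else if inWord then pvWordCount rest true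
    else 1 + pvWordCount rest true

def is_paywalled_py_alt (text : String) (url : String) : Bool :=
  let low := PySem.Str.lower text
  if pvScan pvPhrasesB low.toList then true
  else decide (pvWordCount text.toList false < 100)

-- ===== PRECONDITION & SPEC =====
def Spec_is_paywalled_py (text : String) (url : String) (out : Bool) : Prop := out = is_paywalled_py_alt text url
instance (text : String) (url : String) (out : Bool) : Decidable (Spec_is_paywalled_py text url out) := by unfold Spec_is_paywalled_py; infer_instance

-- ===== CLAIM (what is proved, stated in full; the proofs are below) =====
def Claim_equal_is_paywalled_py : Prop := ∀ (text : String) (url : String), Dom_is_paywalled_py text url → Spec_is_paywalled_py text url (is_paywalled_py text url)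

-- ===== LEMMAS AND PROOFS =====

-- word counter = length of Python's split(): invariant over split₀'s accumulator loop
theorem pvWordCount_go (s : List Char) : ∀ (cur : List Char) (acc : List (List Char)),
    (PySem.Chars.split₀.go s cur acc).length
      = acc.length + (if cur.isEmpty then pvWordCount s false else 1 + pvWordCount s true) := by
  induction s with
  | nil =>
    intro cur acc
    cases cur <;> simp [PySem.Chars.split₀.go, pvWordCount]
  | cons c rest ih =>
    intro cur acc
    cases cur <;> by_cases hsp : PySem.Chars.isspace c = true <;>
      simp [PySem.Chars.split₀.go, pvWordCount, hsp, ih] <;> omega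

theorem pvWordCount_eq_split₀ (text : String) :
    (PySem.Str.split₀ text).length = pvWordCount text.toList false := by
  have h := pvWordCount_go text.toList [] []
  simp [PySem.Chars.split₀] at h
  simp [PySem.Str.split₀, PySem.Chars.split₀, h]

-- B's scan finds a phrase iff some phrase is an infix (for nonempty phrases)
theorem pvScan_iff (P : List String) (hP : ∀ p ∈ P, p.toList ≠ []) (s : List Char) :
    pvScan P s = true ↔ ∃ p ∈ P, ∃ j, p.toList <+: s.drop j := by
  induction s with
  | nil =>
    simp only [pvScan]
    constructor
    · intro h; exact absurd h (by simp)
    · rintro ⟨p, hp, j, hpre⟩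
      simp at hpre
      exact absurd (by simp [hpre] : p.toList = []) (hP p hp)
  | cons c rest ih =>
    simp only [pvScan]
    by_cases h : P.any (fun p => p.toList.isPrefixOf (c :: rest)) = true
    · rw [if_pos h]
      simp only [true_iff]
      rcases List.any_eq_true.mp h with ⟨p, hp, hpre⟩
      exact ⟨p, hp, 0, List.isPrefixOf_iff_prefix.mp hpre⟩
    · rw [if_neg h, ih]
      constructor
      · rintro ⟨p, hp, j, hpre⟩; exact ⟨p, hp, j + 1, by simpa using hpre⟩
      · rintro ⟨p, hp, j, hpre⟩
        cases j with
        | zero =>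
          exact absurd (List.any_eq_true.mpr
            ⟨p, hp, List.isPrefixOf_iff_prefix.mpr (by simpa using hpre)⟩) h
        | succ j => exact ⟨p, hp, j, by simpa using hpre⟩
  
theorem pvScan_eq_any_isIn (s : List Char) :
    pvScan pvPhrasesB s = (pvPhrasesA.any fun p => PySem.Chars.isIn p.toList s) := by
  have hP : ∀ p ∈ pvPhrasesB, p.toList ≠ [] := by decide
  have hAB : pvPhrasesA = pvPhrasesB := rfl
  rw [hAB]
  by_cases h : pvScan pvPhrasesB s = true
  · rcases (pvScan_iff _ hP s).mp h with ⟨p, hp, j, hpre⟩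
    rw [h]
    exact (List.any_eq_true.mpr ⟨p, hp,
      PySem.Chars.exists_prefix_drop_iff_isIn p.toList s |>.mp ⟨j, hpre⟩⟩).symm
  · rw [Bool.not_eq_true] at h
    rw [h]
    symm
    rw [Bool.eq_false_iff]
    intro hany
    rcases List.any_eq_true.mp hany with ⟨p, hp, hin⟩
    rcases (PySem.Chars.exists_prefix_drop_iff_isIn p.toList s).mpr hin with ⟨j, hpre⟩
    exact absurd ((pvScan_iff _ hP s).mpr ⟨p, hp, j, hpre⟩) (by simp [h])

theorem pv_main (text url : String) :
    is_paywalled_py text url = is_paywalled_py_alt text url := by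
  unfold is_paywalled_py is_paywalled_py_alt
  have hscan : pvScan pvPhrasesB (PySem.Str.lower text).toList
      = (pvPhrasesA.any fun p => PySem.Str.isIn p (PySem.Str.lower text)) := by
    rw [pvScan_eq_any_isIn]
    simp [PySem.Str.isIn]
  have hwc : (((PySem.Str.split₀ text).length : Int) < 100) ↔
      (pvWordCount text.toList false < 100) := by
    rw [pvWordCount_eq_split₀ text]
    exact_mod_cast Iff.rfl
  simp only [← hscan]
  cases h : pvScan pvPhrasesB (PySem.Str.lower text).toList <;> simp [hwc]

-- ===== VERDICT (by name: the statement is the Claim_ definition above) =====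
theorem is_paywalled_py_spec : Claim_equal_is_paywalled_py := by
  intro text url _
  unfold Spec_is_paywalled_py
  exact pv_main text url
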